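-- pv_equiv track=rewrite | github.com/eshklyar/ScrapStuff | reverseWords.py | productExceptSelf2
-- ===== SOURCE A (Python) =====
-- def productExceptSelf2( nums: [int]) -> [int]:
--     res = []
--     for i, n in enumerate(nums):
--         sum = 0
--         x = nums[:i] + nums[i+1:]
--         for z in x:
--             sum += z * n
--         res.append(sum)
--     return res
-- ===== SOURCE B (Python) =====
-- def productExceptSelf2(nums: [int]) -> [int]:
--     total = sum(nums)
--     return [n * (total - n) for n in nums]
-- ===== Notes on version B (the rewrite author's own statement) =====
-- stated objective: faster
-- what changed: B precomputes the total sum once and returns n*(total-n) for each element, replacing A's per-element slice-and-inner-loop accumulation.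
import Mathlib
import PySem

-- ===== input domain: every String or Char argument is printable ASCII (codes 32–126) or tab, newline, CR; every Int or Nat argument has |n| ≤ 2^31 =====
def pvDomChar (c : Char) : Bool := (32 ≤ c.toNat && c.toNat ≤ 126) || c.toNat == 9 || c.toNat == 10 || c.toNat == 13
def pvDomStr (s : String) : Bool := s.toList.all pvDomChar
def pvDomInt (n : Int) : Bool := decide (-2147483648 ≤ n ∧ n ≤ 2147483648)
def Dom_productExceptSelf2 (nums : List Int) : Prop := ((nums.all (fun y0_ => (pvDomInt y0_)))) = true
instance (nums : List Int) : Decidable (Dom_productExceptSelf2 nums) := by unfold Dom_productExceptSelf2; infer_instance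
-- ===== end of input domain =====

-- ===== PORT A =====
-- Literal port of A: enumerate, Python slices nums[:i] and nums[i+1:], inner accumulation loop, append.
def productExceptSelf2 (nums : List Int) : List Int :=
  (PySem.List.enumerate nums).foldl (fun res p =>
    let i := p.1
    let n := p.2
    let x := PySem.List.slice nums none (some i) ++ PySem.List.slice nums (some (i + 1)) none
    let sum := x.foldl (fun s z => s + z * n) 0
    res ++ [sum]) []

-- ===== PORT B =====
-- B: one pass — total = sum(nums); each entry is n * (total - n).
def productExceptSelf2_alt (nums : List Int) : List Int :=
  let total := nums.foldl (· + ·) 0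
  nums.map (fun n => n * (total - n))

-- ===== PRECONDITION & SPEC =====
def Spec_productExceptSelf2 (nums : List Int) (out : List Int) : Prop := out = productExceptSelf2_alt nums
instance (nums : List Int) (out : List Int) : Decidable (Spec_productExceptSelf2 nums out) := by unfold Spec_productExceptSelf2; infer_instance

-- ===== CLAIM (what is proved, stated in full; the proofs are below) =====
def Claim_equal_productExceptSelf2 : Prop := ∀ (nums : List Int), Dom_productExceptSelf2 nums → Spec_productExceptSelf2 nums (productExceptSelf2 nums)

-- ===== LEMMAS AND PROOFS =====

-- ===== VERDICT (by name: the statement is the Claim_ definition above) =====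
lemma pv_foldl_mul (n : Int) (x : List Int) (s : Int) :
    x.foldl (fun s z => s + z * n) s = s + x.sum * n := by
  induction x generalizing s with
  | nil => simp
  | cons a xs ih => simp [ih, List.sum_cons]; ring

lemma pv_foldl_add (x : List Int) (s : Int) :
    x.foldl (· + ·) s = s + x.sum := by
  induction x generalizing s with
  | nil => simp
  | cons a xs ih => simp [ih, List.sum_cons]; ring

lemma pv_sum_erase (nums : List Int) (k : Nat) (hk : k < nums.length) :
    (nums.take k).sum + (nums.drop (k + 1)).sum = nums.sum - nums[k] := by
  have h : nums.sum = (nums.take k).sum + (nums[k] + (nums.drop (k + 1)).sum) := by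
    conv_lhs => rw [← List.take_append_drop k nums, List.drop_eq_getElem_cons hk]
    simp only [List.sum_append, List.sum_cons]
  omega

theorem productExceptSelf2_spec : Claim_equal_productExceptSelf2 := by
  intro nums _
  unfold Spec_productExceptSelf2 productExceptSelf2 productExceptSelf2_alt
  rw [PySem.List.foldl_append_singleton_eq_map, pv_foldl_add]
  simp only [List.nil_append, zero_add]
  apply List.ext_getElem
  · simp [PySem.List.length_enumerate]
  · intro k h1 h2
    simp only [List.getElem_map, PySem.List.getElem_enumerate]
    have hk : k < nums.length := by simpa [PySem.List.length_enumerate] using h1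
    have h0 : ((0 : Int) + (k : Int)) = ((k : Int)) := by ring
    rw [h0, PySem.List.slice_to_natCast]
    have h1' : ((k : Int) + 1) = (((k + 1 : Nat) : Int)) := by push_cast; ring
    rw [h1', PySem.List.slice_from_natCast, pv_foldl_mul, List.sum_append,
       pv_sum_erase nums k hk]
    ring
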